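-- pv_equiv track=rewrite | github.com/Solrovivrus/racetrack | Project4/valueIteration.py | startQTable
-- ===== SOURCE A (Python) =====
-- def startQTable(width, height, possAccel):
--     qTable = []
--     for w in range(height):
--         x = []
--         for h in range(width):
--             y = []
--             for xvel in range(-5,6):
--                 xVelocity = []
--                 for yvel in range(-5,6):
--                     yVelocity = []
--                     for a in range(len(possAccel)):
--                         yVelocity.append(0)
--                     xVelocity.append(yVelocity)
--                 y.append(xVelocity)
--             x.append(y)
--         qTable.append(x)
--     return qTable
-- ===== SOURCE B (Python) =====
-- def startQTable(width, height, possAccel):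
--     dims = [height, width, 11, 11, len(possAccel)]
--
--     def build(i):
--         if i == len(dims) - 1:
--             return [0] * dims[i]
--         return [build(i + 1) for _ in range(dims[i])]
--
--     return build(0)
-- ===== Notes on version B (the rewrite author's own statement) =====
-- stated objective: simpler
-- what changed: Replaces five hard-coded nested append loops with a short recursive builder driven by a dimension list dims = [height, width, 11, 11, len(possAccel)].
import Mathlib
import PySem

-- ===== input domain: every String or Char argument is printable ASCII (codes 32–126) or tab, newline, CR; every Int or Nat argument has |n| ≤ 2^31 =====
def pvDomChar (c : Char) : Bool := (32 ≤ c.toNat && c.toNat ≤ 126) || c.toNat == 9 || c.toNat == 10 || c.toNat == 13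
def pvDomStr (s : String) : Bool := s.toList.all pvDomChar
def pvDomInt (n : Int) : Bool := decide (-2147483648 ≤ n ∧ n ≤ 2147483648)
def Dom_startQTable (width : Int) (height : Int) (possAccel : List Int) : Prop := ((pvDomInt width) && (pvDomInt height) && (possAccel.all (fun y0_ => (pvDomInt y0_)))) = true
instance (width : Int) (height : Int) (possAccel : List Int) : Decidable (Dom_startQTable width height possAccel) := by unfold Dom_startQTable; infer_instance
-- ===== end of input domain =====

-- B replaces A's five hard-coded nested append loops with a dimension-list-driven
-- recursive builder (objective: simpler); same values, same cost.

-- ===== PORT A =====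
-- literal port of A's five nested for-loops, each appending to an accumulator
def startQTable (width : Int) (height : Int) (possAccel : List Int) : List (List (List (List (List Int)))) :=
  (PySem.List.pyRange 0 height 1).foldl (fun qTable _w =>
    qTable ++ [
      (PySem.List.pyRange 0 width 1).foldl (fun x _h =>
        x ++ [
          (PySem.List.pyRange (-5) 6 1).foldl (fun y _xvel =>
            y ++ [
              (PySem.List.pyRange (-5) 6 1).foldl (fun xVelocity _yvel =>
                xVelocity ++ [
                  (PySem.List.pyRange 0 (possAccel.length : Int) 1).foldl
                    (fun yVelocity _a => yVelocity ++ [(0 : Int)]) []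
                ]) []
            ]) []
        ]) []
    ]) []

-- ===== PORT B =====
-- B's build(i) recurses over dims = [height, width, 11, 11, len(possAccel)]; Lean's
-- types fix the nesting depth, so each recursive level is transcribed as one
-- replicate of the next level ([next for _ in range(dim)] = replicate of a constant).
def pvLevel {α : Type} (dim : Int) (next : α) : List α := List.replicate dim.toNat next

def startQTable_alt (width : Int) (height : Int) (possAccel : List Int) : List (List (List (List (List Int)))) :=
  pvLevel height (pvLevel width (pvLevel 11 (pvLevel 11 (pvLevel (possAccel.length : Int) (0 : Int)))))

-- ===== PRECONDITION & SPEC =====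
def Spec_startQTable (width : Int) (height : Int) (possAccel : List Int) (out : List (List (List (List (List Int))))) : Prop := out = startQTable_alt width height possAccel
instance (width : Int) (height : Int) (possAccel : List Int) (out : List (List (List (List (List Int))))) : Decidable (Spec_startQTable width height possAccel out) := by unfold Spec_startQTable; infer_instance

-- ===== CLAIM (what is proved, stated in full; the proofs are below) =====
def Claim_equal_startQTable : Prop := ∀ (width : Int) (height : Int) (possAccel : List Int), Dom_startQTable width height possAccel → Spec_startQTable width height possAccel (startQTable width height possAccel)

-- ===== LEMMAS AND PROOFS =====

-- a fold that appends one fixed element per iteration is a replicate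
theorem foldl_append_const {α β : Type} (l : List β) (c : α) (init : List α) :
    l.foldl (fun acc _ => acc ++ [c]) init = init ++ List.replicate l.length c := by
  induction l generalizing init with
  | nil => simp
  | cons b bs ih => simp [List.foldl, ih, List.replicate_succ, List.append_assoc]

theorem foldl_append_const_pyRange {α : Type} (n : Int) (c : α) :
    (PySem.List.pyRange 0 n 1).foldl (fun acc _ => acc ++ [c]) [] = List.replicate n.toNat c := by
  rw [foldl_append_const, PySem.List.length_pyRange_one]
  simp

-- ===== VERDICT (by name: the statement is the Claim_ definition above) =====
theorem startQTable_spec : Claim_equal_startQTable := by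
  intro width height possAccel _
  show _ = _
  unfold startQTable startQTable_alt pvLevel
  rw [foldl_append_const_pyRange (possAccel.length : Int)]
  have h11 : (PySem.List.pyRange (-5) 6 1).foldl
      (fun (acc : List (List Int)) _ => acc ++ [List.replicate (possAccel.length : Int).toNat (0:Int)]) []
      = List.replicate 11 (List.replicate (possAccel.length : Int).toNat (0:Int)) := by
    rw [foldl_append_const, PySem.List.length_pyRange_one]; simp
  rw [h11]
  have h11' : (PySem.List.pyRange (-5) 6 1).foldl
      (fun (acc : List (List (List Int))) _ =>
        acc ++ [List.replicate 11 (List.replicate (possAccel.length : Int).toNat (0:Int))]) []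
      = List.replicate 11 (List.replicate 11 (List.replicate (possAccel.length : Int).toNat (0:Int))) := by
    rw [foldl_append_const, PySem.List.length_pyRange_one]; simp
  rw [h11', foldl_append_const_pyRange width, foldl_append_const_pyRange height]
  have h : (11 : Int).toNat = 11 := rfl
  rw [h]
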